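-- pv_equiv track=rewrite | github.com/Ivorian/saffio_core | saffio_core/core.py | get_dict_high_percent
-- ===== SOURCE A (Python) =====
-- def get_dict_high_percent(dic, p):
--     ret = {}
--     acc = 0
--     for key, value in sorted(dic.items(), key=lambda k: (k[1], k[0]), reverse=True):
--         acc += value
--         ret[key] = value
--         if acc >= p:
--             return ret
--     return ret
-- ===== SOURCE B (Python) =====
-- def get_dict_high_percent(dic, p):
--     remaining = dict(dic)
--     ret = {}
--     acc = 0
--     while remaining:
--         key, value = max(remaining.items(), key=lambda kv: (kv[1], kv[0]))
--         del remaining[key]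
--         ret[key] = value
--         acc += value
--         if acc >= p:
--             break
--     return ret
-- ===== Notes on version B (the rewrite author's own statement) =====
-- stated objective: alternative
-- what changed: Replaces A's sort-then-scan (sort all items by (value,key) descending, accumulate with early return) by selection without any sort: repeatedly extract the maximum remaining item by (value,key) from a shrinking dict until the accumulator reaches p or the dict is empty.
import Mathlib
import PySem

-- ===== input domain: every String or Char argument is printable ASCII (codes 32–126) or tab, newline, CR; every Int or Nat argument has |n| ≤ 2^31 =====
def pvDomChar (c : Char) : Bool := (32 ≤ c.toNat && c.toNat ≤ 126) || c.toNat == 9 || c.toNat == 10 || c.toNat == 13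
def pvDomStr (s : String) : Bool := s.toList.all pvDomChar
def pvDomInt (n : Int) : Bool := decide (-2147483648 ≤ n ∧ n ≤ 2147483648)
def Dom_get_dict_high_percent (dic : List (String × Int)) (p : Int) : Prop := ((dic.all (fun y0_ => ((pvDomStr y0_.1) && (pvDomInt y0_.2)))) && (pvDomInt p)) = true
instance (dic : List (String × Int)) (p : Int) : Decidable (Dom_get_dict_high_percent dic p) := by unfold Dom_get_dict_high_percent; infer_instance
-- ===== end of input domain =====

-- B replaces A's sort-then-accumulate-with-early-return by selection without any sort:
-- repeatedly pull the maximum remaining item by (value, key) out of a shrinking dict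
-- until the accumulator reaches p or nothing is left; same return value, no mutation of the argument.

-- ===== PORT A =====
-- the 'for key, value in sorted(...)' loop with its early 'return ret' on acc >= p
def pvAGo (p : Int) : List (String × Int) → Int → PySem.Dict String Int → PySem.Dict String Int
  | [], _, ret => ret
  | (key, value) :: rest, acc, ret =>
    let acc' := acc + value
    let ret' := ret.insert key value
    if p ≤ acc' then ret' else pvAGo p rest acc' ret'

def get_dict_high_percent (dic : List (String × Int)) (p : Int) : List (String × Int) :=
  (pvAGo p (PySem.List.sorted2 (PySem.Dict.ofList dic).items (fun kv => kv.2) (fun kv => kv.1) true) 0 PySem.Dict.empty).items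

-- ===== PORT B =====
-- Python's max(items, key=lambda kv: (kv[1], kv[0])) on a nonempty list: running max keeping the first on ties
def pvMaxKV (it : String × Int) (rest : List (String × Int)) : String × Int :=
  rest.foldl (fun m x => if (decide (m.2 < x.2) || (!decide (x.2 < m.2) && decide (m.1 < x.1))) then x else m) it

theorem pvMaxKV_mem (it : String × Int) (rest : List (String × Int)) :
    pvMaxKV it rest ∈ it :: rest := by
  unfold pvMaxKV
  induction rest generalizing it with
  | nil => simp
  | cons x xs ih =>
    simp only [List.foldl_cons]
    split_ifs
    · rcases List.mem_cons.mp (ih x) with h | h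
      · rw [h]; simp
      · exact List.mem_cons_of_mem _ (List.mem_cons_of_mem _ h)
    · rcases List.mem_cons.mp (ih it) with h | h
      · rw [h]; simp
      · exact List.mem_cons_of_mem _ (List.mem_cons_of_mem _ h)

theorem pvEraseLt (l : List (String × Int)) (x : String × Int) (hx : x ∈ l) :
    (l.filter (fun q => !(q.1 == x.1))).length < l.length := by
  rw [List.length_filter_lt_length_iff_exists]
  exact ⟨x, hx, by simp⟩

-- B's 'while remaining:' loop: pick max, delete it, insert into ret, accumulate, stop when acc >= p
def pvBGo (p : Int) (remaining : PySem.Dict String Int) (acc : Int) (ret : PySem.Dict String Int) : PySem.Dict String Int :=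
  match hh : remaining.items with
  | [] => ret
  | it :: rest =>
    let kv := pvMaxKV it rest
    let remaining' := remaining.erase kv.1
    let ret' := ret.insert kv.1 kv.2
    let acc' := acc + kv.2
    if p ≤ acc' then ret' else pvBGo p remaining' acc' ret'
  termination_by remaining.items.length
  decreasing_by
    show (remaining.erase (pvMaxKV it rest).1).items.length < remaining.items.length
    have hmem : pvMaxKV it rest ∈ remaining.items := hh ▸ pvMaxKV_mem it rest
    have : (remaining.erase (pvMaxKV it rest).1).items
        = remaining.items.filter (fun q => !(q.1 == (pvMaxKV it rest).1)) := rfl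
    rw [this]
    exact pvEraseLt _ _ hmem

def get_dict_high_percent_alt (dic : List (String × Int)) (p : Int) : List (String × Int) :=
  (pvBGo p (PySem.Dict.ofList dic) 0 PySem.Dict.empty).items

-- ===== PRECONDITION & SPEC =====
def Spec_get_dict_high_percent (dic : List (String × Int)) (p : Int) (out : List (String × Int)) : Prop := out = get_dict_high_percent_alt dic p
instance (dic : List (String × Int)) (p : Int) (out : List (String × Int)) : Decidable (Spec_get_dict_high_percent dic p out) := by unfold Spec_get_dict_high_percent; infer_instance

-- ===== CLAIM (what is proved, stated in full; the proofs are below) =====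
def Claim_equal_get_dict_high_percent : Prop := ∀ (dic : List (String × Int)) (p : Int), Dom_get_dict_high_percent dic p → Spec_get_dict_high_percent dic p (get_dict_high_percent dic p)

-- ===== LEMMAS AND PROOFS =====
set_option maxRecDepth 4000

-- B's tuple order, the (value, key) lexicographic comparison both ports sort/select by
def pvLt (a b : String × Int) : Bool :=
  decide (a.2 < b.2) || (!decide (b.2 < a.2) && decide (a.1 < b.1))

theorem pvLt_asymm {a b : String × Int} (h : pvLt a b = true) : pvLt b a = false := by
  unfold pvLt at *
  by_cases h1 : a.2 < b.2 <;> by_cases h2 : b.2 < a.2 <;> by_cases h3 : a.1 < b.1 <;>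
    by_cases h4 : b.1 < a.1 <;> simp_all <;> first
    | exact absurd (lt_trans h1 h2) (lt_irrefl _)
    | exact absurd (lt_trans h3 h4) (lt_irrefl _)

theorem pvLt_irrefl (a : String × Int) : pvLt a a = false := by
  unfold pvLt; simp

theorem pvLt_trans {a b c : String × Int} (h1 : pvLt a b = true) (h2 : pvLt b c = true) :
    pvLt a c = true := by
  unfold pvLt at *
  simp only [Bool.or_eq_true, Bool.and_eq_true, Bool.not_eq_true', decide_eq_true_eq,
    decide_eq_false_iff_not] at *
  rcases h1 with h1 | ⟨h1a, h1b⟩ <;> rcases h2 with h2 | ⟨h2a, h2b⟩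
  · exact Or.inl (lt_trans h1 h2)
  · exact Or.inl (lt_of_lt_of_le h1 (le_of_not_gt h2a))
  · exact Or.inl (lt_of_le_of_lt (le_of_not_gt h1a) h2)
  · exact Or.inr ⟨fun h => h1a (lt_of_le_of_lt (le_of_not_gt h2a) h), lt_trans h1b h2b⟩

theorem pvLt_total {a b : String × Int} (hne : a ≠ b) : pvLt a b = true ∨ pvLt b a = true := by
  unfold pvLt
  simp only [Bool.or_eq_true, Bool.and_eq_true, Bool.not_eq_true', decide_eq_true_eq,
    decide_eq_false_iff_not]
  rcases lt_trichotomy a.2 b.2 with h | h | h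
  · exact Or.inl (Or.inl h)
  · rcases lt_trichotomy a.1 b.1 with h1 | h1 | h1
    · exact Or.inl (Or.inr ⟨fun hh => absurd h.symm (ne_of_lt hh), h1⟩)
    · exact absurd (Prod.ext h1 h) hne
    · exact Or.inr (Or.inr ⟨fun hh => absurd h (ne_of_lt hh), h1⟩)
  · exact Or.inr (Or.inl h)

-- negative co-transitivity: not (m < m0), not (m0 < x) → not (m < x)
theorem pvLt_neg_trans {m m0 x : String × Int} (h1 : pvLt m m0 = false) (h2 : pvLt m0 x = false) :
    pvLt m x = false := by
  by_cases he : m = x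
  · subst he; exact pvLt_irrefl m
  · rcases pvLt_total he with h | h
    · exfalso
      by_cases he2 : m0 = x
      · subst he2; rw [h] at h1; cases h1
      · rcases pvLt_total he2 with h3 | h3
        · rw [h3] at h2; cases h2
        · rw [pvLt_trans h h3] at h1; cases h1
    · exact pvLt_asymm h

-- the running max is never pvLt-below any scanned element
theorem pvMaxKV_isMax (it : String × Int) (rest : List (String × Int)) :
    ∀ y ∈ it :: rest, pvLt (pvMaxKV it rest) y = false := by
  induction rest generalizing it with
  | nil =>
    intro y hy
    rcases List.mem_cons.mp hy with rfl | h
    · exact pvLt_irrefl y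
    · cases h
  | cons x xs ih =>
    intro y hy
    have hstep : pvMaxKV it (x :: xs) = if pvLt it x = true then pvMaxKV x xs else pvMaxKV it xs := by
      unfold pvMaxKV pvLt
      rw [List.foldl_cons]
      exact apply_ite (fun z => List.foldl
        (fun m x => if (decide (m.2 < x.2) || (!decide (x.2 < m.2) && decide (m.1 < x.1))) = true then x else m) z xs)
        ((decide (it.2 < x.2) || (!decide (x.2 < it.2) && decide (it.1 < x.1))) = true) x it
    rw [hstep]
    rcases List.mem_cons.mp hy with rfl | hy2
    · -- y = it
      split_ifs with h
      · exact pvLt_neg_trans (ih x x (by simp)) (pvLt_asymm h)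
      · exact ih y y (by simp)
    · rcases List.mem_cons.mp hy2 with rfl | hy3
      · split_ifs with h
        · exact ih y y (by simp)
        · exact pvLt_neg_trans (ih it it (by simp)) (Bool.eq_false_iff.mpr h)
      · split_ifs with h
        · exact ih x y (by simp [hy3])
        · exact ih it y (by simp [hy3])

-- insertBy with flipped pvLt preserves descending (non-strict) order
theorem pvInsertBy_pairwise (x : String × Int) (ys : List (String × Int))
    (h : ys.Pairwise (fun a b => pvLt a b = false)) :
    (PySem.List.insertBy (fun a b => pvLt b a) x ys).Pairwise (fun a b => pvLt a b = false) := by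
  induction ys with
  | nil => simp [PySem.List.insertBy]
  | cons y ys ih =>
    rw [List.pairwise_cons] at h
    obtain ⟨hy, hys⟩ := h
    simp only [PySem.List.insertBy]
    split_ifs with hb
    · -- x goes first: pvLt y x, so ¬ pvLt x y, and ¬ pvLt x z for z ∈ ys
      refine List.pairwise_cons.mpr ⟨?_, List.pairwise_cons.mpr ⟨hy, hys⟩⟩
      intro z hz
      rcases List.mem_cons.mp hz with rfl | hz2
      · exact pvLt_asymm hb
      · exact pvLt_neg_trans (pvLt_asymm hb) (hy z hz2)
    · refine List.pairwise_cons.mpr ⟨?_, ih hys⟩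
      intro z hz
      rcases (PySem.List.mem_insertBy _ _ _ _).mp hz with rfl | hz2
      · simpa using hb
      · exact hy z hz2

theorem pvSorted2_pairwise (l : List (String × Int)) :
    (PySem.List.sorted2 l (fun kv => kv.2) (fun kv => kv.1) true).Pairwise
      (fun a b => pvLt a b = false) := by
  have : ∀ (l : List (String × Int)) (acc : List (String × Int)),
      acc.Pairwise (fun a b => pvLt a b = false) →
      (l.foldl (fun acc x => PySem.List.insertBy (fun a b => pvLt b a) x acc) acc).Pairwise
        (fun a b => pvLt a b = false) := by
    intro l
    induction l with
    | nil => intro acc h; exact h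
    | cons x xs ih => intro acc h; exact ih _ (pvInsertBy_pairwise x acc h)
  have he : PySem.List.sorted2 l (fun kv => kv.2) (fun kv => kv.1) true
      = l.foldl (fun acc x => PySem.List.insertBy (fun a b => pvLt b a) x acc) [] := by
    simp [PySem.List.sorted2, pvLt]
  rw [he]
  exact this l [] (by simp)

-- non-strict descending + no duplicates = strict descending
theorem pvStrict (l : List (String × Int)) (hnd : l.Nodup)
    (h : l.Pairwise (fun a b => pvLt a b = false)) :
    l.Pairwise (fun a b => pvLt b a = true) := by
  refine (h.and hnd).imp ?_
  rintro a b ⟨h1, h2⟩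
  rcases pvLt_total h2 with h3 | h3
  · rw [h3] at h1; cases h1
  · exact h3

-- two strictly-descending permutations are equal
theorem pvSortedUnique (l1 l2 : List (String × Int)) (hp : l1.Perm l2)
    (h1 : l1.Pairwise (fun a b => pvLt b a = true))
    (h2 : l2.Pairwise (fun a b => pvLt b a = true)) : l1 = l2 := by
  exact List.Perm.eq_of_pairwise
    (fun a b _ _ ha hb => absurd hb (by simp [pvLt_asymm ha])) h1 h2 hp

-- the main induction: B's selection loop = A's loop over the sorted items
theorem pvB_eq_A (n : Nat) : ∀ (d : PySem.Dict String Int), d.items.length ≤ n →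
    (d.items.map Prod.fst).Nodup → ∀ (p acc : Int) (ret : PySem.Dict String Int),
    pvBGo p d acc ret
      = pvAGo p (PySem.List.sorted2 d.items (fun kv => kv.2) (fun kv => kv.1) true) acc ret := by
  induction n with
  | zero =>
    intro d hlen hnd p acc ret
    have h0 : d.items = [] := List.eq_nil_of_length_eq_zero (Nat.le_zero.mp hlen)
    rw [pvBGo.eq_def]
    split
    · rw [h0]; rfl
    · rename_i it rest heq; rw [h0] at heq; cases heq
  | succ n ih =>
    intro d hlen hnd p acc ret
    rw [pvBGo.eq_def]
    split
    · rename_i heq; rw [heq]; rfl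
    · rename_i it rest heq
      have hperm : (PySem.List.sorted2 d.items (fun kv => kv.2) (fun kv => kv.1) true).Perm d.items :=
        PySem.List.sorted2_perm _ _ _ _
      have hitems_nd : d.items.Nodup := hnd.of_map
      have hs_nd : (PySem.List.sorted2 d.items (fun kv => kv.2) (fun kv => kv.1) true).Nodup :=
        (hperm.nodup_iff).mpr hitems_nd
      have hs_strict := pvStrict _ hs_nd (pvSorted2_pairwise d.items)
      obtain ⟨hd, tl, hs⟩ : ∃ hd tl,
          PySem.List.sorted2 d.items (fun kv => kv.2) (fun kv => kv.1) true = hd :: tl := by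
        cases hsc : PySem.List.sorted2 d.items (fun kv => kv.2) (fun kv => kv.1) true with
        | nil =>
          exfalso
          have h1 : d.items = [] := (hsc ▸ hperm).nil_eq.symm
          rw [h1] at heq; cases heq
        | cons a b => exact ⟨a, b, rfl⟩
      have hhd_mem_items : hd ∈ d.items := hperm.subset (hs ▸ List.mem_cons_self)
      have hmax : pvMaxKV it rest = hd := by
        have hmem_s : pvMaxKV it rest ∈ hd :: tl := by
          rw [← hs]; exact hperm.mem_iff.mpr (heq ▸ pvMaxKV_mem it rest)
        rcases List.mem_cons.mp hmem_s with h | h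
        · exact h
        · exfalso
          have h1 : pvLt (pvMaxKV it rest) hd = false :=
            pvMaxKV_isMax it rest hd (heq ▸ hhd_mem_items)
          have h2 : pvLt (pvMaxKV it rest) hd = true := by
            have hp : List.Pairwise (fun a b => pvLt b a = true) (hd :: tl) := hs ▸ hs_strict
            exact (List.pairwise_cons.mp hp).1 _ h
          rw [h1] at h2; cases h2
      -- the erased dict's items: d.items minus the selected pair, still in order
      have herase : (d.erase (pvMaxKV it rest).1).items
          = d.items.filter (fun q => !(q.1 == hd.1)) := by rw [hmax]; rfl
      have hkey_nd : ((hd :: tl).map Prod.fst).Nodup := by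
        rw [← hs]; exact ((hperm.map Prod.fst).nodup_iff).mpr hnd
      have hfilter_perm : (d.items.filter (fun q => !(q.1 == hd.1))).Perm tl := by
        have h1 : (d.items.filter (fun q => !(q.1 == hd.1))).Perm
            ((hd :: tl).filter (fun q => !(q.1 == hd.1))) := by
          refine List.Perm.filter _ ?_
          rw [← hs]; exact hperm.symm
        have h2 : (hd :: tl).filter (fun q => !(q.1 == hd.1)) = tl := by
          rw [List.filter_cons]
          simp only [beq_self_eq_true, Bool.not_true]
          refine List.filter_eq_self.mpr ?_
          intro a ha
          have : a.1 ≠ hd.1 := by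
            intro hk
            have := List.nodup_cons.mp hkey_nd
            exact this.1 (hk ▸ List.mem_map_of_mem ha)
          simpa using this
        exact h2 ▸ h1
      have htl_strict : tl.Pairwise (fun a b => pvLt b a = true) :=
        (List.pairwise_cons.mp (hs ▸ hs_strict)).2
      have hsorted_erase :
          PySem.List.sorted2 (d.erase (pvMaxKV it rest).1).items
            (fun kv => kv.2) (fun kv => kv.1) true = tl := by
        rw [herase]
        refine pvSortedUnique _ _ ?_ ?_ htl_strict
        · exact (PySem.List.sorted2_perm _ _ _ _).trans hfilter_perm
        · refine pvStrict _ ?_ (pvSorted2_pairwise _)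
          exact ((PySem.List.sorted2_perm _ _ _ _).nodup_iff).mpr
            (List.Sublist.nodup (List.filter_sublist) hitems_nd)
      have hlen' : (d.erase (pvMaxKV it rest).1).items.length ≤ n := by
        have h1 := hfilter_perm.length_eq
        have h2 := hperm.length_eq
        rw [hs] at h2
        rw [herase, h1]
        simp only [List.length_cons] at h2
        omega
      have hnd' : ((d.erase (pvMaxKV it rest).1).items.map Prod.fst).Nodup := by
        rw [herase]
        exact List.Sublist.nodup (List.Sublist.map Prod.fst List.filter_sublist) hnd
      rw [hs, hmax]
      show (if p ≤ acc + hd.2 then ret.insert hd.1 hd.2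
            else pvBGo p (d.erase hd.1) (acc + hd.2) (ret.insert hd.1 hd.2))
          = pvAGo p (hd :: tl) acc ret
      rw [pvAGo]
      split_ifs with hif
      · rfl
      · rw [← hmax] at *
        rw [ih _ hlen' hnd' p (acc + (pvMaxKV it rest).2) (ret.insert (pvMaxKV it rest).1 (pvMaxKV it rest).2),
          hsorted_erase, hmax]

theorem get_dict_high_percent_spec : Claim_equal_get_dict_high_percent := by
  unfold Claim_equal_get_dict_high_percent Spec_get_dict_high_percent
  intro dic p _
  unfold get_dict_high_percent get_dict_high_percent_alt
  have hnd : ((PySem.Dict.ofList dic).items.map Prod.fst).Nodup := PySem.Dict.nodup_keys_ofList dic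
  rw [pvB_eq_A (PySem.Dict.ofList dic).items.length _ le_rfl hnd]
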